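-- pv_equiv track=rewrite | github.com/VishalTheHuman/Leetcode | 1961. Check If String Is a Prefix of Array/Solution.py | isPrefixString
-- ===== SOURCE A (Python) =====
-- from typing import List
--
-- def isPrefixString(s: str, words: List[str]) -> bool:
--     K = 0
--     for i in range(len(words)):
--         K += len(words[i])
--         if K == len(s):
--             return s == "".join(words[:i+1])
--         if K > len(s):
--             return False
--     return False
-- ===== SOURCE B (Python) =====
-- def isPrefixString(s, words):
--     idx = 0
--     for word in words:
--         if s[idx:idx+len(word)] != word:
--             return False
--         idx += len(word)
--         if idx == len(s):
--             return True
--     return False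
-- ===== Notes on version B (the rewrite author's own statement) =====
-- stated objective: idiomatic
-- what changed: Replaces A's running length accumulator with a deferred join of words[:i+1] plus one whole-string comparison by a moving cursor that compares each word against the corresponding slice of s incrementally, never building a joined string and exiting at the first mismatch.
import Mathlib
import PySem

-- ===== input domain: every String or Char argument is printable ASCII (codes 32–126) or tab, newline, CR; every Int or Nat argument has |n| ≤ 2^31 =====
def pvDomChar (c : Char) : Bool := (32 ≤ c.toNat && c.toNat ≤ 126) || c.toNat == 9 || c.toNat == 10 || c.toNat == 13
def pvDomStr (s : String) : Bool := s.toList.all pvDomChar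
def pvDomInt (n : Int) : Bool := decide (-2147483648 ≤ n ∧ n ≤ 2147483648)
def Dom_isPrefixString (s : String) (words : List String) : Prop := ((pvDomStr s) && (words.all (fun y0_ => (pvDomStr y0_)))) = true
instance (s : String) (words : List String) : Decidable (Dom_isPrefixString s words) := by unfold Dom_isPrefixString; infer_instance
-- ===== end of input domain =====

-- B replaces A's length accumulator + deferred single join/compare with an incremental
-- per-word slice comparison at a moving cursor (idiomatic one-pass check; no join built).


-- ===== PORT A =====
-- A's loop over i with accumulator K; 'done' carries the already-scanned words, so that
-- words[:i+1] is 'done ++ [w]' and the Python branches appear in the same order.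
def pvAGo (s : List Char) : List (List Char) → Nat → List (List Char) → Bool
  | [], _, _ => false
  | w :: rest, K, done =>
    if K + w.length = s.length then decide (s = PySem.Chars.join [] (done ++ [w]))
    else if s.length < K + w.length then false
    else pvAGo s rest (K + w.length) (done ++ [w])

def isPrefixString (s : String) (words : List String) : Bool :=
  pvAGo s.toList (words.map String.toList) 0 []

-- ===== PORT B =====
-- B's loop: cursor idx; compare s[idx:idx+len(word)] with the word, advance, test idx == len(s).
def pvBGo (s : List Char) : List (List Char) → Nat → Bool
  | [], _ => false
  | w :: rest, idx =>
    if PySem.List.slice s (some (idx : Int)) (some ((idx + w.length : Nat) : Int)) = w then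
      if idx + w.length = s.length then true else pvBGo s rest (idx + w.length)
    else false

def isPrefixString_alt (s : String) (words : List String) : Bool :=
  pvBGo s.toList (words.map String.toList) 0

-- ===== PRECONDITION & SPEC =====
def Spec_isPrefixString (s : String) (words : List String) (out : Bool) : Prop := out = isPrefixString_alt s words
instance (s : String) (words : List String) (out : Bool) : Decidable (Spec_isPrefixString s words out) := by unfold Spec_isPrefixString; infer_instance

-- ===== CLAIM (what is proved, stated in full; the proofs are below) =====
def Claim_equal_isPrefixString : Prop := ∀ (s : String) (words : List String), Dom_isPrefixString s words → Spec_isPrefixString s words (isPrefixString s words)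

-- ===== LEMMAS AND PROOFS =====

lemma pvJoinNilFlatten (css : List (List Char)) : PySem.Chars.join [] css = css.flatten := by
  induction css with
  | nil => simp [PySem.Chars.join_nil]
  | cons c t ih =>
    cases t with
    | nil => simp [PySem.Chars.join_singleton]
    | cons d u => rw [PySem.Chars.join_cons_cons]; simp_all

lemma pvSliceNat (s : List Char) (K m : Nat) :
    PySem.List.slice s (some (K : Int)) (some ((K + m : Nat) : Int)) = (s.drop K).take m := by
  rw [PySem.List.slice_toNat s (Int.natCast_nonneg K) (Int.natCast_nonneg (K + m))]
  simp
  omega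

-- once the scanned words no longer form the corresponding prefix of s, A returns false
lemma pvAGo_false_of_mismatch (s : List Char) :
    ∀ (ws done : List (List Char)) (K : Nat),
      done.flatten.length = K → done.flatten ≠ s.take K → pvAGo s ws K done = false := by
  intro ws
  induction ws with
  | nil => intro done K _ _; rfl
  | cons w rest ih =>
    intro done K hlen hne
    unfold pvAGo
    split_ifs with h1 h2
    · simp only [decide_eq_false_iff_not]
      intro hs
      have h4 : List.take K s = done.flatten := by
        rw [hs, pvJoinNilFlatten, List.flatten_append, List.flatten_cons,
          List.flatten_nil, List.append_nil]
        exact List.take_left' hlen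
      exact hne h4.symm
    · rfl
    · apply ih (done ++ [w]) (K + w.length) (by simp [hlen])
      simp only [List.flatten_append, List.flatten_cons, List.flatten_nil, List.append_nil]
      intro hcontra
      apply hne
      have h3 : (done.flatten ++ w).take K = done.flatten := List.take_left' hlen
      rw [← h3, hcontra, List.take_take]
      congr 1
      omega

-- the two loops agree whenever the scanned words so far are exactly s[:K]
lemma pvLoops_eq (s : List Char) :
    ∀ (ws done : List (List Char)) (K : Nat),
      done.flatten = s.take K → K ≤ s.length → pvAGo s ws K done = pvBGo s ws K := by
  intro ws
  induction ws with
  | nil => intro done K _ _; rfl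
  | cons w rest ih =>
    intro done K hpre hK
    have hlen : done.flatten.length = K := by rw [hpre]; simp; omega
    have hsplit : s = s.take K ++ s.drop K := (List.take_append_drop K s).symm
    unfold pvAGo pvBGo
    rw [pvSliceNat]
    simp only [pvJoinNilFlatten, List.flatten_append, List.flatten_cons, List.flatten_nil,
      List.append_nil, hpre]
    by_cases h1 : K + w.length = s.length
    · rw [if_pos h1, if_pos h1]
      have hdrop : (s.drop K).take w.length = s.drop K := by
        apply List.take_of_length_le; simp; omega
      rw [hdrop]
      by_cases h2 : s.drop K = w
      · rw [if_pos h2]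
        simp only [decide_eq_true_eq]
        rw [← h2]
        exact hsplit
      · rw [if_neg h2]
        simp only [decide_eq_false_iff_not]
        intro hs
        exact h2 (List.append_cancel_left (hsplit.symm.trans hs))
    · rw [if_neg h1, if_neg h1]
      by_cases h2 : s.length < K + w.length
      · rw [if_pos h2]
        rw [if_neg (by intro hc; have := congrArg List.length hc; simp at this; omega)]
      · rw [if_neg h2]
        by_cases h3 : (s.drop K).take w.length = w
        · rw [if_pos h3]
          apply ih (done ++ [w]) (K + w.length)
          · simp only [List.flatten_append, List.flatten_cons, List.flatten_nil,
              List.append_nil, hpre]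
            rw [List.take_add, h3]
          · omega
        · rw [if_neg h3]
          apply pvAGo_false_of_mismatch s rest (done ++ [w]) (K + w.length) (by simp [hlen])
          simp only [List.flatten_append, List.flatten_cons, List.flatten_nil,
            List.append_nil, hpre]
          intro hcontra
          apply h3
          rw [List.take_add] at hcontra
          exact (List.append_cancel_left hcontra).symm

-- ===== VERDICT (by name: the statement is the Claim_ definition above) =====
theorem isPrefixString_spec : Claim_equal_isPrefixString := by
  intro s words _
  unfold Spec_isPrefixString isPrefixString isPrefixString_alt
  exact pvLoops_eq s.toList (words.map String.toList) [] 0 (by simp) (by simp)
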